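-- pv_equiv track=rewrite | github.com/Gayeon6423/Improvement-of-the-Coreference-Resolution-model | augmentation/utils_filtering.py | find_coreference_terms
-- ===== SOURCE A (Python) =====
-- def find_coreference_terms(ontonotes_format, clusters_token_offsets):
--     result = []
--     sentence_lengths = [len(sentence) for sentence in ontonotes_format]
--     clusters_token_offsets_list = []
--     clusters_token_offsets_list.append(clusters_token_offsets)
--
--     cluster_terms = []
--     for start, end in clusters_token_offsets:
--         # 문장 번호와 인덱스를 결정
--         sentence_idx = 0
--         for i, length in enumerate(sentence_lengths):
--             if start < length:
--                 sentence_idx = i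
--                 break
--             start -= length
--             end -= length
--         # 해당 문장에서 단어를 추출
--         terms = ontonotes_format[sentence_idx][start:end+1]
--         cluster_terms.append(terms)
--     result.append(cluster_terms)
--
--     return result
-- ===== SOURCE B (Python) =====
-- def find_coreference_terms(ontonotes_format, clusters_token_offsets):
--     # prefix sums of sentence lengths, built once
--     cum = []
--     total = 0
--     for sentence in ontonotes_format:
--         total += len(sentence)
--         cum.append(total)
--     n = len(cum)
--     cluster_terms = []
--     for start, end in clusters_token_offsets:
--         # binary search: least i with start < cum[i]
--         lo, hi = 0, n
--         while lo < hi: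
--             mid = (lo + hi) // 2
--             if start < cum[mid]:
--                 hi = mid
--             else:
--                 lo = mid + 1
--         if lo == n:
--             # offset beyond the last token: no such span exists
--             cluster_terms.append([])
--         else:
--             base = cum[lo] - len(ontonotes_format[lo])
--             cluster_terms.append(ontonotes_format[lo][start - base:end - base + 1])
--     return [cluster_terms]
-- ===== Notes on version B (the rewrite author's own statement) =====
-- stated objective: alternative
-- what changed: B builds the sentence-length prefix sums once and binary-searches them for each cluster offset, replacing A's per-cluster linear subtraction scan over the sentences; offsets starting past the last token yield an empty span instead of A's wrap-around slice of sentence 0.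
-- intended difference: On cluster offset pairs whose start lies at or past the document's last token but, after A's wrap-around subtraction, still cuts a nonempty slice out of sentence 0, A returns those sentence-0 tokens while B returns the empty span, the intended value for a nonexistent token range. — e.g. on find_coreference_terms([["a", "b", "c"], ["d"]], [(4, 4)]): A returns [[["a"]]], B returns [[[]]]
import Mathlib
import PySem

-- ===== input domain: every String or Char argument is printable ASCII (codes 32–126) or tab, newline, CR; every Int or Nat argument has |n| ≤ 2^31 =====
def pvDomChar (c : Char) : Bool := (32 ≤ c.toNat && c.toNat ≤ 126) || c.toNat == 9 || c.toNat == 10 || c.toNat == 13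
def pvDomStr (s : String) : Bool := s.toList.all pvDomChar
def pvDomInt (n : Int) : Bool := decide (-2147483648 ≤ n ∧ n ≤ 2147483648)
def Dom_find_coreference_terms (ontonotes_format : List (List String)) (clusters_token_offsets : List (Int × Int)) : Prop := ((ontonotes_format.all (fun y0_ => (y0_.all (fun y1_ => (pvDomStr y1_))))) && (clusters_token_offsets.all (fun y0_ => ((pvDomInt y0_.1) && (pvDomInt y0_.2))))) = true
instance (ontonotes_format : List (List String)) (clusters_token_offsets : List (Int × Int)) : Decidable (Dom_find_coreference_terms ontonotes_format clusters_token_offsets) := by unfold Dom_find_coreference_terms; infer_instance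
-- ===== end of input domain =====

-- B replaces A's per-cluster linear scan over the sentences by one prefix-sum pass plus a
-- binary search per cluster offset; on offsets past the last token A returns an accidental
-- slice of sentence 0 while B returns [] (stated as D_ below).

-- ===== PORT A =====
-- inner 'for i, length in enumerate(sentence_lengths): …' loop of A: returns
-- (sentence_idx, start, end) exactly as A leaves them (idx 0 and fully
-- decremented offsets when the loop never breaks)
def pvAFind : List Int → Nat → Int → Int → Nat × Int × Int
  | [], _, start, e => (0, start, e)
  | l :: ls, i, start, e =>
      if start < l then (i, start, e) else pvAFind ls (i + 1) (start - l) (e - l)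

def find_coreference_terms (ontonotes_format : List (List String)) (clusters_token_offsets : List (Int × Int)) : List (List (List String)) :=
  let sentence_lengths := ontonotes_format.map (fun sentence => (sentence.length : Int))
  let cluster_terms := clusters_token_offsets.map (fun se =>
    let r := pvAFind sentence_lengths 0 se.1 se.2
    -- ontonotes_format[sentence_idx][start:end+1]; pyGet? none = IndexError (excluded by Pre_)
    match PySem.List.pyGet? ontonotes_format (r.1 : Int) with
    | some sent => PySem.List.slice sent (some r.2.1) (some (r.2.2 + 1))
    | none => [])
  [cluster_terms]

-- ===== PORT B =====
-- prefix sums of sentence lengths (B's first loop)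
def pvCum : List (List String) → Int → List Int
  | [], _ => []
  | sentence :: rest, t => (t + sentence.length) :: pvCum rest (t + sentence.length)

-- B's 'while lo < hi' binary search; the fuel argument only makes the loop
-- structurally recursive (hi - lo shrinks each iteration, so fuel ≥ hi - lo is exact)
def pvBSearch (cum : List Int) (x : Int) : Nat → Nat → Nat → Nat
  | 0, lo, _ => lo
  | fuel + 1, lo, hi =>
      if lo < hi then
        let mid := (lo + hi) / 2
        if x < cum.getD mid 0 then pvBSearch cum x fuel lo mid
        else pvBSearch cum x fuel (mid + 1) hi
      else lo

def find_coreference_terms_alt (ontonotes_format : List (List String)) (clusters_token_offsets : List (Int × Int)) : List (List (List String)) :=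
  let cum := pvCum ontonotes_format 0
  let n := cum.length
  let cluster_terms := clusters_token_offsets.map (fun se =>
    let lo := pvBSearch cum se.1 n 0 n
    if lo == n then []
    else
      -- ontonotes_format[lo] is in range (lo < n); getD is exact here
      let base := cum.getD lo 0 - ((ontonotes_format.getD lo []).length : Int)
      PySem.List.slice (ontonotes_format.getD lo []) (some (se.1 - base)) (some (se.2 - base + 1)))
  [cluster_terms]

-- ===== PRECONDITION & SPEC =====
-- Pre_ excludes exactly the inputs where A raises IndexError: an empty sentence list
-- together with a nonempty cluster list (A then evaluates ontonotes_format[0]).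
def Pre_find_coreference_terms (ontonotes_format : List (List String)) (clusters_token_offsets : List (Int × Int)) : Prop :=
  ontonotes_format ≠ [] ∨ clusters_token_offsets = []
instance (ontonotes_format : List (List String)) (clusters_token_offsets : List (Int × Int)) : Decidable (Pre_find_coreference_terms ontonotes_format clusters_token_offsets) := by unfold Pre_find_coreference_terms; infer_instance

def pvWitness_find_coreference_terms : List (List String) × (List (Int × Int)) := ([["a"]], [(0, 0)])

-- On cluster offsets that start at or past the last token of the whole document, A wraps
-- around and returns tokens sliced out of sentence 0, while B returns the empty span,
-- which is the intended value for a nonexistent token range.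
def D_find_coreference_terms (ontonotes_format : List (List String)) (clusters_token_offsets : List (Int × Int)) : Prop :=
  ∃ p ∈ clusters_token_offsets,
    let t : Int := (ontonotes_format.map List.length).sum
    let h : Int := (ontonotes_format.headD []).length
    let b : Int := p.2 - t + 1
    t ≤ p.1 ∧ p.1 - t < h ∧ p.1 - t < (if b < 0 then h + b else b)
instance (ontonotes_format : List (List String)) (clusters_token_offsets : List (Int × Int)) : Decidable (D_find_coreference_terms ontonotes_format clusters_token_offsets) := by unfold D_find_coreference_terms; infer_instance

def Spec_find_coreference_terms (ontonotes_format : List (List String)) (clusters_token_offsets : List (Int × Int)) (out : List (List (List String))) : Prop := ¬ D_find_coreference_terms ontonotes_format clusters_token_offsets → out = find_coreference_terms_alt ontonotes_format clusters_token_offsets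
instance (ontonotes_format : List (List String)) (clusters_token_offsets : List (Int × Int)) (out : List (List (List String))) : Decidable (Spec_find_coreference_terms ontonotes_format clusters_token_offsets out) := by unfold Spec_find_coreference_terms; infer_instance

def pvDiffWitness_find_coreference_terms : List (List String) × (List (Int × Int)) := ([["a", "b", "c"], ["d"]], [(4, 4)])
def pvDiffWitnessOut_find_coreference_terms : (List (List (List String))) × (List (List (List String))) := ([[["a"]]], [[[]]])

-- ===== CLAIM (what is proved, stated in full; the proofs are below) =====
def Claim_unchanged_find_coreference_terms : Prop := ∀ (ontonotes_format : List (List String)) (clusters_token_offsets : List (Int × Int)), Dom_find_coreference_terms ontonotes_format clusters_token_offsets → Pre_find_coreference_terms ontonotes_format clusters_token_offsets → Spec_find_coreference_terms ontonotes_format clusters_token_offsets (find_coreference_terms ontonotes_format clusters_token_offsets)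
def Claim_changed_find_coreference_terms : Prop := Dom_find_coreference_terms (pvDiffWitness_find_coreference_terms.1) (pvDiffWitness_find_coreference_terms.2) ∧ Pre_find_coreference_terms (pvDiffWitness_find_coreference_terms.1) (pvDiffWitness_find_coreference_terms.2) ∧ D_find_coreference_terms (pvDiffWitness_find_coreference_terms.1) (pvDiffWitness_find_coreference_terms.2) ∧ find_coreference_terms (pvDiffWitness_find_coreference_terms.1) (pvDiffWitness_find_coreference_terms.2) = pvDiffWitnessOut_find_coreference_terms.1 ∧ find_coreference_terms_alt (pvDiffWitness_find_coreference_terms.1) (pvDiffWitness_find_coreference_terms.2) = pvDiffWitnessOut_find_coreference_terms.2 ∧ pvDiffWitnessOut_find_coreference_terms.1 ≠ pvDiffWitnessOut_find_coreference_terms.2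
def Claim_exact_find_coreference_terms : Prop := ∀ (ontonotes_format : List (List String)) (clusters_token_offsets : List (Int × Int)), Dom_find_coreference_terms ontonotes_format clusters_token_offsets → Pre_find_coreference_terms ontonotes_format clusters_token_offsets → D_find_coreference_terms ontonotes_format clusters_token_offsets → find_coreference_terms ontonotes_format clusters_token_offsets ≠ find_coreference_terms_alt ontonotes_format clusters_token_offsets
-- ===== LEMMAS AND PROOFS =====

-- least j with s < (sum of the first j+1 lengths), walking and subtracting like A does
def pvIdxLt (s : Int) : List Int → Option Nat
  | [] => none
  | l :: ls => if s < l then some 0 else (pvIdxLt (s - l) ls).map (· + 1)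

-- the sentence index both sides agree on: found index, or the list length
def pvTOf (s : Int) (ls : List Int) : Nat := (pvIdxLt s ls).getD ls.length

lemma pvAFind_eq (ls : List Int) (i : Nat) (s e : Int) :
    pvAFind ls i s e =
      match pvIdxLt s ls with
      | some j => (i + j, s - (ls.take j).sum, e - (ls.take j).sum)
      | none => (0, s - ls.sum, e - ls.sum) := by
  induction ls generalizing i s e with
  | nil => simp [pvAFind, pvIdxLt]
  | cons l ls ih =>
      by_cases h : s < l
      · simp [pvAFind, pvIdxLt, h]
      · simp only [pvAFind, pvIdxLt, if_neg h]
        rw [ih]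
        cases hix : pvIdxLt (s - l) ls with
        | none => simp [List.sum_cons]; constructor <;> ring
        | some j =>
            simp only [Option.map_some]
            simp [List.take_succ_cons, List.sum_cons]
            refine ⟨by omega, by ring, by ring⟩

lemma pvIdxLt_some_lt {s : Int} {ls : List Int} {j : Nat} (h : pvIdxLt s ls = some j) :
    j < ls.length := by
  induction ls generalizing s j with
  | nil => simp [pvIdxLt] at h
  | cons l ls ih =>
      by_cases hs : s < l
      · simp only [pvIdxLt, if_pos hs, Option.some.injEq] at h
        simp [← h]
      · simp only [pvIdxLt, if_neg hs] at h
        cases hix : pvIdxLt (s - l) ls with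
        | none => rw [hix] at h; simp at h
        | some j' => rw [hix] at h; simp at h; have := ih hix; simp; omega

lemma pvTOf_spec (s : Int) (ls : List Int) :
    pvTOf s ls ≤ ls.length ∧
    (∀ k, k < pvTOf s ls → (ls.take (k + 1)).sum ≤ s) ∧
    (pvTOf s ls < ls.length → s < (ls.take (pvTOf s ls + 1)).sum) := by
  induction ls generalizing s with
  | nil => simp [pvTOf, pvIdxLt]
  | cons l ls ih =>
      by_cases hs : s < l
      · refine ⟨by simp [pvTOf, pvIdxLt, hs], ?_, ?_⟩
        · intro k hk; simp [pvTOf, pvIdxLt, hs] at hk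
        · intro _; simpa [pvTOf, pvIdxLt, hs] using hs
      · obtain ⟨ih1, ih2, ih3⟩ := ih (s - l)
        have hT : pvTOf s (l :: ls) = pvTOf (s - l) ls + 1 := by
          simp only [pvTOf, pvIdxLt, if_neg hs]
          cases hix : pvIdxLt (s - l) ls <;> simp [hix]
        refine ⟨by simp [hT]; omega, ?_, ?_⟩
        · intro k hk
          rw [hT] at hk
          cases k with
          | zero => simpa using le_of_not_gt hs
          | succ k' =>
              have := ih2 k' (by omega)
              simp [List.take_succ_cons, List.sum_cons]; omega
        · intro hlt
          rw [hT] at hlt ⊢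
          have := ih3 (by simpa using hlt)
          simp [List.take_succ_cons, List.sum_cons]; omega

lemma pvCum_length (onf : List (List String)) (t : Int) :
    (pvCum onf t).length = onf.length := by
  induction onf generalizing t with
  | nil => simp [pvCum]
  | cons x xs ih => simp [pvCum, ih]

lemma pvCum_getD (onf : List (List String)) (t : Int) (j : Nat) (hj : j < onf.length) :
    (pvCum onf t).getD j 0 = t + ((onf.map (fun x => (x.length : Int))).take (j + 1)).sum := by
  induction onf generalizing t j with
  | nil => simp at hj
  | cons x xs ih =>
      cases j with
      | zero => simp [pvCum]
      | succ j' =>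
          have hj' : j' < xs.length := by simpa using hj
          simp only [pvCum, List.getD_cons_succ]
          rw [ih _ _ hj']
          simp [List.take_succ_cons, List.sum_cons]; ring

lemma pvSumTake_mono (ls : List Int) (hnn : ∀ a ∈ ls, 0 ≤ a) {i j : Nat} (hij : i ≤ j) :
    (ls.take i).sum ≤ (ls.take j).sum := by
  have h1 : ls.take j = ls.take i ++ (ls.drop i).take (j - i) := by
    rw [← List.take_add]; congr 1; omega
  rw [h1, List.sum_append]
  have h2 : 0 ≤ ((ls.drop i).take (j - i)).sum := by
    apply List.sum_nonneg
    intro a ha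
    exact hnn a (List.mem_of_mem_drop (List.mem_of_mem_take ha))
  omega

lemma pvBSearch_spec (cum : List Int) (x : Int)
    (mono : ∀ i j, i ≤ j → j < cum.length → cum.getD i 0 ≤ cum.getD j 0) :
    ∀ fuel lo hi t, hi - lo ≤ fuel → lo ≤ t → t ≤ hi → hi ≤ cum.length →
    (∀ j, j < t → cum.getD j 0 ≤ x) → (t < hi → x < cum.getD t 0) →
    pvBSearch cum x fuel lo hi = t := by
  intro fuel
  induction fuel with
  | zero =>
      intro lo hi t hfuel h1 h2 hhi hlow hhit
      simp only [pvBSearch]; omega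
  | succ fuel ih =>
      intro lo hi t hfuel h1 h2 hhi hlow hhit
      by_cases hlt : lo < hi
      · have hmid1 : lo ≤ (lo + hi) / 2 := by omega
        have hmid2 : (lo + hi) / 2 < hi := by omega
        simp only [pvBSearch, if_pos hlt]
        by_cases hx : x < cum.getD ((lo + hi) / 2) 0
        · rw [if_pos hx]
          have htm : t ≤ (lo + hi) / 2 := by
            by_contra hcn
            push_neg at hcn
            have := hlow ((lo + hi) / 2) hcn
            omega
          exact ih lo ((lo + hi) / 2) t (by omega) h1 htm (by omega) hlow
            (fun h => hhit (by omega))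
        · rw [if_neg hx]
          have hml : (lo + hi) / 2 + 1 ≤ t := by
            by_contra hcn
            push_neg at hcn
            have h5 := hhit (by omega)
            have h6 := mono t ((lo + hi) / 2) (by omega) (by omega)
            omega
          exact ih ((lo + hi) / 2 + 1) hi t (by omega) hml h2 hhi hlow hhit
      · simp only [pvBSearch, if_neg hlt]; omega

lemma pvClampIdx_eval (n : Nat) (i : Int) :
    PySem.List.clampIdx n i = if i < 0 then n - (-i).toNat else min i.toNat n := by
  unfold PySem.List.clampIdx
  split_ifs <;> omega

lemma pvSlice_eq_nil_iff {α : Type} (xs : List α) (a b : Int) :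
    PySem.List.slice xs (some a) (some b) = [] ↔
      PySem.List.clampIdx xs.length b ≤ PySem.List.clampIdx xs.length a := by
  rw [← List.length_eq_zero_iff, PySem.List.length_slice]
  omega

-- B's binary search lands on the same sentence index as A's linear scan
lemma pvSearch_eq (onf : List (List String)) (s : Int) :
    pvBSearch (pvCum onf 0) s (pvCum onf 0).length 0 (pvCum onf 0).length
      = pvTOf s (onf.map (fun x => (x.length : Int))) := by
  have hlen := pvCum_length onf 0
  have hmaplen : (onf.map (fun x => (x.length : Int))).length = onf.length := by simp
  obtain ⟨hT1, hT2, hT3⟩ := pvTOf_spec s (onf.map (fun x => (x.length : Int)))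
  have hnn : ∀ a ∈ onf.map (fun x => (x.length : Int)), 0 ≤ a := by
    intro a ha
    obtain ⟨x, _, rfl⟩ := List.mem_map.mp ha
    positivity
  apply pvBSearch_spec
  · intro i j hij hj
    rw [hlen] at hj
    rw [pvCum_getD _ _ i (by omega), pvCum_getD _ _ j hj]
    have := pvSumTake_mono (onf.map (fun x => (x.length : Int))) hnn
      (Nat.add_le_add_right hij 1)
    omega
  · omega
  · omega
  · omega
  · omega
  · intro j hj
    rw [pvCum_getD _ _ j (by omega)]
    have := hT2 j hj
    omega
  · intro hlt
    rw [hlen] at hlt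
    rw [pvCum_getD _ _ _ hlt]
    have := hT3 (by omega)
    omega

-- proof-side restatement of D_'s per-pair condition
def pvTotal : List (List String) → Int
  | [] => 0
  | sentence :: rest => sentence.length + pvTotal rest

def pvHeadLen : List (List String) → Int
  | [] => 0
  | sentence :: _ => sentence.length

def pvCond (onf : List (List String)) (p : Int × Int) : Bool :=
  decide (pvTotal onf ≤ p.1) &&
  decide (p.1 - pvTotal onf < pvHeadLen onf) &&
  (if p.2 - pvTotal onf + 1 < 0
   then decide (p.1 - pvTotal onf < pvHeadLen onf + (p.2 - pvTotal onf + 1))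
   else decide (p.1 ≤ p.2))

lemma pvTotal_eq (onf : List (List String)) :
    pvTotal onf = (onf.map (fun x => (x.length : Int))).sum := by
  induction onf with
  | nil => simp [pvTotal]
  | cons h t ih => simp [pvTotal, ih]

lemma pvCond_iff (onf : List (List String)) (p : Int × Int) :
    pvCond onf p = true ↔
      pvTotal onf ≤ p.1 ∧ p.1 - pvTotal onf < pvHeadLen onf ∧
      ((p.2 - pvTotal onf + 1 < 0 ∧
          p.1 - pvTotal onf < pvHeadLen onf + (p.2 - pvTotal onf + 1)) ∨
       (¬ (p.2 - pvTotal onf + 1 < 0) ∧ p.1 ≤ p.2)) := by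
  unfold pvCond
  by_cases hb : p.2 - pvTotal onf + 1 < 0 <;> simp [hb, and_assoc]

lemma pvTotal_cast (onf : List (List String)) :
    pvTotal onf = (((onf.map List.length).sum : Nat) : Int) := by
  induction onf with
  | nil => simp [pvTotal]
  | cons h t ih => simp [pvTotal, ih]

lemma pvHeadLen_cast (onf : List (List String)) :
    pvHeadLen onf = (((onf.headD []).length : Nat) : Int) := by
  cases onf <;> simp [pvHeadLen]

lemma pvD_iff (onf : List (List String)) (cs : List (Int × Int)) :
    D_find_coreference_terms onf cs ↔ ∃ p ∈ cs, pvCond onf p = true := by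
  unfold D_find_coreference_terms
  refine exists_congr fun p => and_congr_right fun _ => ?_
  rw [pvCond_iff, pvTotal_cast, pvHeadLen_cast]
  by_cases hb : p.2 - (((onf.map List.length).sum : Nat) : Int) + 1 < 0
  · simp only [if_pos hb]
    constructor
    · rintro ⟨h1, h2, h3⟩; exact ⟨h1, h2, Or.inl ⟨hb, h3⟩⟩
    · rintro ⟨h1, h2, h3 | h3⟩ <;> exact ⟨h1, h2, by omega⟩
  · simp only [if_neg hb]
    constructor
    · rintro ⟨h1, h2, h3⟩; exact ⟨h1, h2, Or.inr ⟨hb, by omega⟩⟩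
    · rintro ⟨h1, h2, h3 | h3⟩ <;> exact ⟨h1, h2, by omega⟩

-- per-pair agreement outside the change region
lemma pvPair_eq (onf : List (List String)) (hne : onf ≠ []) (s e : Int)
    (hnc : ¬ pvCond onf (s, e) = true) :
    (let r := pvAFind (onf.map (fun x => (x.length : Int))) 0 s e
     match PySem.List.pyGet? onf (r.1 : Int) with
     | some sent => PySem.List.slice sent (some r.2.1) (some (r.2.2 + 1))
     | none => []) =
    (let cum := pvCum onf 0
     let lo := pvBSearch cum s cum.length 0 cum.length
     if lo == cum.length then []
     else
       let base := cum.getD lo 0 - ((onf.getD lo []).length : Int)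
       PySem.List.slice (onf.getD lo []) (some (s - base)) (some (e - base + 1))) := by
  have hmaplen : (onf.map (fun x => (x.length : Int))).length = onf.length := by simp
  have hlen := pvCum_length onf 0
  simp only [pvAFind_eq, pvSearch_eq, pvTOf]
  cases hix : pvIdxLt s (onf.map (fun x => (x.length : Int))) with
  | some j =>
      have hj : j < onf.length := by
        have := pvIdxLt_some_lt hix; omega
      have hne2 : (j == (pvCum onf 0).length) = false := by
        simp [hlen]; omega
      have hbase : (pvCum onf 0).getD j 0 - ((onf.getD j []).length : Int)
          = ((onf.map (fun x => (x.length : Int))).take j).sum := by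
        rw [pvCum_getD _ _ _ hj, List.sum_take_succ _ j (by omega),
            List.getD_eq_getElem _ _ hj]
        simp
      simp only [Option.getD_some, hne2, Nat.zero_add, Bool.false_eq_true, if_false,
        PySem.List.pyGet?_natCast, List.getElem?_eq_getElem hj, hbase]
      rw [List.getD_eq_getElem _ _ hj]
  | none =>
      obtain ⟨h0, tl, rfl⟩ : ∃ h0 tl, onf = h0 :: tl := by
        cases onf with
        | nil => exact absurd rfl hne
        | cons h0 tl => exact ⟨h0, tl, rfl⟩
      obtain ⟨hT1, hT2, hT3⟩ := pvTOf_spec s ((h0 :: tl).map (fun x => (x.length : Int)))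
      rw [pvTOf, hix, Option.getD_none] at hT2
      have hTle : ((h0 :: tl).map (fun x => (x.length : Int))).sum ≤ s := by
        have := hT2 (((h0 :: tl).map (fun x => (x.length : Int))).length - 1) (by simp)
        rw [show ((h0 :: tl).map (fun x => (x.length : Int))).length - 1 + 1
              = ((h0 :: tl).map (fun x => (x.length : Int))).length by simp,
            List.take_length] at this
        exact this
      simp only [hix, Option.getD_none, hmaplen, hlen, beq_self_eq_true, if_true,
        Nat.cast_zero, PySem.List.pyGet?_zero_cons]
      rw [pvCond_iff] at hnc
      simp only [pvTotal_eq, pvHeadLen] at hnc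
      rw [pvSlice_eq_nil_iff, pvClampIdx_eval, pvClampIdx_eval]
      split_ifs <;> omega

-- per-pair disagreement inside the change region
lemma pvPair_ne (onf : List (List String)) (s e : Int)
    (hc : pvCond onf (s, e) = true) :
    (let r := pvAFind (onf.map (fun x => (x.length : Int))) 0 s e
     match PySem.List.pyGet? onf (r.1 : Int) with
     | some sent => PySem.List.slice sent (some r.2.1) (some (r.2.2 + 1))
     | none => []) ≠ [] ∧
    (let cum := pvCum onf 0
     let lo := pvBSearch cum s cum.length 0 cum.length
     if lo == cum.length then []
     else
       let base := cum.getD lo 0 - ((onf.getD lo []).length : Int)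
       PySem.List.slice (onf.getD lo []) (some (s - base)) (some (e - base + 1))) = [] := by
  have hmaplen : (onf.map (fun x => (x.length : Int))).length = onf.length := by simp
  have hlen := pvCum_length onf 0
  obtain ⟨hT1, hT2, hT3⟩ := pvTOf_spec s (onf.map (fun x => (x.length : Int)))
  have hnn : ∀ a ∈ onf.map (fun x => (x.length : Int)), 0 ≤ a := by
    intro a ha
    obtain ⟨x, _, rfl⟩ := List.mem_map.mp ha
    positivity
  rw [pvCond_iff] at hc
  obtain ⟨hc1, hc2, hc3⟩ := hc
  obtain ⟨h0, tl, rfl⟩ : ∃ h0 tl, onf = h0 :: tl := by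
    cases onf with
    | nil =>
        exfalso
        simp only [pvTotal, pvHeadLen] at hc1 hc2
        omega
    | cons h0 tl => exact ⟨h0, tl, rfl⟩
  simp only [pvTotal_eq, pvHeadLen] at hc1 hc2 hc3
  have hix : pvIdxLt s ((h0 :: tl).map (fun x => (x.length : Int))) = none := by
    cases hix : pvIdxLt s ((h0 :: tl).map (fun x => (x.length : Int))) with
    | none => rfl
    | some j =>
        have hjl := pvIdxLt_some_lt hix
        rw [pvTOf, hix, Option.getD_some] at hT3
        have h5 := hT3 (by omega)
        have h6 := pvSumTake_mono ((h0 :: tl).map (fun x => (x.length : Int))) hnn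
          (show j + 1 ≤ ((h0 :: tl).map (fun x => (x.length : Int))).length by omega)
        rw [List.take_length] at h6
        omega
  simp only [pvAFind_eq, pvSearch_eq, pvTOf]
  simp only [hix, Option.getD_none, hmaplen, hlen, beq_self_eq_true, if_true,
    Nat.cast_zero, PySem.List.pyGet?_zero_cons]
  refine ⟨?_, trivial⟩
  rw [Ne, pvSlice_eq_nil_iff, pvClampIdx_eval, pvClampIdx_eval]
  split_ifs <;> omega

-- ===== VERDICT (by name: the statement is the Claim_ definition above) =====
theorem find_coreference_terms_spec : Claim_unchanged_find_coreference_terms := by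
  intro onf cs _ hpre hnd
  by_cases hcs : cs = []
  · subst hcs; rfl
  · have hne : onf ≠ [] := by
      rcases hpre with h | h
      · exact h
      · exact absurd h hcs
    rw [pvD_iff] at hnd
    push_neg at hnd
    show find_coreference_terms onf cs = find_coreference_terms_alt onf cs
    simp only [find_coreference_terms, find_coreference_terms_alt]
    refine congrArg (fun l => [l]) ?_
    apply List.map_congr_left
    intro p hp
    obtain ⟨s, e⟩ := p
    exact pvPair_eq onf hne s e (hnd (s, e) hp)

theorem find_coreference_terms_changed : Claim_changed_find_coreference_terms := by
  unfold Claim_changed_find_coreference_terms; decide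

theorem find_coreference_terms_tight : Claim_exact_find_coreference_terms := by
  intro onf cs _ hpre hd heq
  rw [pvD_iff] at hd
  obtain ⟨p, hp, hc⟩ := hd
  obtain ⟨s, e⟩ := p
  have hpair := pvPair_ne onf s e hc
  simp only [find_coreference_terms, find_coreference_terms_alt, List.cons.injEq,
    and_true] at heq
  obtain ⟨i, hi, hieq⟩ := List.mem_iff_getElem.mp hp
  have h2 : ∀ (j : Nat), (cs.map (fun se =>
      let r := pvAFind (onf.map (fun sentence => (sentence.length : Int))) 0 se.1 se.2
      match PySem.List.pyGet? onf (r.1 : Int) with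
      | some sent => PySem.List.slice sent (some r.2.1) (some (r.2.2 + 1))
      | none => []))[j]? = (cs.map (fun se =>
      let lo := pvBSearch (pvCum onf 0) se.1 (pvCum onf 0).length 0 (pvCum onf 0).length
      if lo == (pvCum onf 0).length then []
      else
        let base := (pvCum onf 0).getD lo 0 - ((onf.getD lo []).length : Int)
        PySem.List.slice (onf.getD lo []) (some (se.1 - base)) (some (se.2 - base + 1))))[j]? := by
    intro j; rw [heq]
  have h3 := h2 i
  rw [List.getElem?_map, List.getElem?_map, List.getElem?_eq_getElem hi, hieq] at h3
  simp only [Option.map_some, Option.some.injEq] at h3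
  exact hpair.1 (h3.trans hpair.2)
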